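-- pv_equiv track=rewrite | github.com/pypi-data/pypi-mirror-369 | packages/ccproxy-api/ccproxy_api-0.1.6-py3-none-any.whl/ccproxy/cli/commands/config/commands.py | _group_config_rows
-- ===== SOURCE A (Python) =====
-- def _group_config_rows(
--     rows: list[tuple[str, str, str]],
-- ) -> dict[str, list[tuple[str, str, str]]]:
--     """Group configuration rows by their top-level section."""
--     groups: dict[str, list[tuple[str, str, str]]] = {}
--
--     for setting, value, description in rows:
--         # Determine the group based on the setting name
--         if setting.startswith("server"):
--             group_name = "Server Configuration"
--         elif setting.startswith("security"):
--             group_name = "Security Configuration"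
--         elif setting.startswith("cors"):
--             group_name = "CORS Configuration"
--         elif setting.startswith("claude"):
--             group_name = "Claude CLI Configuration"
--         elif setting.startswith("reverse_proxy"):
--             group_name = "Reverse Proxy Configuration"
--         elif setting.startswith("auth"):
--             group_name = "Authentication Configuration"
--         elif setting.startswith("docker"):
--             group_name = "Docker Configuration"
--         elif setting.startswith("observability"):
--             group_name = "Observability Configuration"
--         elif setting.startswith("scheduler"):
--             group_name = "Scheduler Configuration"
--         elif setting.startswith("pricing"):
--             group_name = "Pricing Configuration"
--         else:
--             group_name = "General Configuration"
--
--         if group_name not in groups: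
--             groups[group_name] = []
--
--         # Clean up the setting name by removing the prefix
--         clean_setting = setting.split("_", 1)[1] if "_" in setting else setting
--         groups[group_name].append((clean_setting, value, description))
--
--     return groups
-- ===== SOURCE B (Python) =====
-- _GROUP_TABLE = [
--     ("server", "Server Configuration"),
--     ("security", "Security Configuration"),
--     ("cors", "CORS Configuration"),
--     ("claude", "Claude CLI Configuration"),
--     ("reverse_proxy", "Reverse Proxy Configuration"),
--     ("auth", "Authentication Configuration"),
--     ("docker", "Docker Configuration"),
--     ("observability", "Observability Configuration"),
--     ("scheduler", "Scheduler Configuration"),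
--     ("pricing", "Pricing Configuration"),
-- ]
--
--
-- def _group_name(setting):
--     for prefix, name in _GROUP_TABLE:
--         if setting.startswith(prefix):
--             return name
--     return "General Configuration"
--
--
-- def _clean_setting(setting):
--     return setting.split("_", 1)[1] if "_" in setting else setting
--
--
-- def _group_config_rows(rows):
--     # Stage 1: tag each row with its group name, cleaning the setting.
--     tagged = [
--         (_group_name(setting), (_clean_setting(setting), value, description))
--         for setting, value, description in rows
--     ]
--     # Stage 2: the group names in first-occurrence order.
--     order = list(dict.fromkeys(name for name, _ in tagged))
--     # Stage 3: one group at a time, by filtering the tagged rows.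
--     return {g: [row for name, row in tagged if name == g] for g in order}
-- ===== Notes on version B (the rewrite author's own statement) =====
-- stated objective: simpler
-- what changed: Replaces A's single-pass mutable-dict grouping (if/elif chain plus 'ensure key then append') by a staged algorithm: tag every row with its group via a first-match table loop, dedup the tags for first-occurrence order, then build each group by filtering the tagged rows.
import Mathlib
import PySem

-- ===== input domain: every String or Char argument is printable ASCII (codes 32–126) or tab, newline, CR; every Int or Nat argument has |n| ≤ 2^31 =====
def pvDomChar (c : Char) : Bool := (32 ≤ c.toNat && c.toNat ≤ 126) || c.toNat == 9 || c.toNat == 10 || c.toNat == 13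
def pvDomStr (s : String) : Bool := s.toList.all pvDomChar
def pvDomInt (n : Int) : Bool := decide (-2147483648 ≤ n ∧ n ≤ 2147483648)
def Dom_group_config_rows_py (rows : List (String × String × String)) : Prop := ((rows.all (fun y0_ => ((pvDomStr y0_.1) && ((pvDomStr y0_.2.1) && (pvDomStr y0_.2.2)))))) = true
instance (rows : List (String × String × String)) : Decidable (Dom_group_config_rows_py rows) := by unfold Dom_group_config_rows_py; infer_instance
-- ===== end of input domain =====

-- B replaces A's single-pass dict accumulation by a staged algorithm — tag each row with its group,
-- dedup the group names in first-occurrence order, then build each group by filtering the tagged rows: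
-- simpler to read, no mutable dict during the scan (same asymptotic cost: the group count is bounded).

-- ===== PORT A =====
-- clean_setting = setting.split("_", 1)[1] if "_" in setting else setting  (same expression in A and B)
def pvCleanSetting (setting : String) : String :=
  if PySem.Str.isIn "_" setting then
    ((PySem.Str.splitMax? setting "_" 1).getD []).getD 1 ""
  else setting

-- the if/elif chain choosing the group name
def pvGroupChain (setting : String) : String :=
  if PySem.Str.startswith setting "server" then "Server Configuration"
  else if PySem.Str.startswith setting "security" then "Security Configuration"
  else if PySem.Str.startswith setting "cors" then "CORS Configuration"
  else if PySem.Str.startswith setting "claude" then "Claude CLI Configuration"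
  else if PySem.Str.startswith setting "reverse_proxy" then "Reverse Proxy Configuration"
  else if PySem.Str.startswith setting "auth" then "Authentication Configuration"
  else if PySem.Str.startswith setting "docker" then "Docker Configuration"
  else if PySem.Str.startswith setting "observability" then "Observability Configuration"
  else if PySem.Str.startswith setting "scheduler" then "Scheduler Configuration"
  else if PySem.Str.startswith setting "pricing" then "Pricing Configuration"
  else "General Configuration"

def group_config_rows_py (rows : List (String × String × String)) : List (String × List (String × String × String)) :=
  (rows.foldl (fun (groups : PySem.Dict String (List (String × String × String))) row =>
      let setting := row.1; let value := row.2.1; let description := row.2.2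
      let group_name := pvGroupChain setting
      -- if group_name not in groups: groups[group_name] = []
      let groups := if groups.contains group_name then groups else groups.insert group_name []
      -- groups[group_name].append((clean_setting, value, description))
      groups.modify group_name [] (· ++ [(pvCleanSetting setting, value, description)]))
    PySem.Dict.empty).items

-- ===== PORT B =====
def pvGroupTable : List (String × String) :=
  [("server", "Server Configuration"), ("security", "Security Configuration"),
   ("cors", "CORS Configuration"), ("claude", "Claude CLI Configuration"),
   ("reverse_proxy", "Reverse Proxy Configuration"), ("auth", "Authentication Configuration"),
   ("docker", "Docker Configuration"), ("observability", "Observability Configuration"),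
   ("scheduler", "Scheduler Configuration"), ("pricing", "Pricing Configuration")]

-- _group_name: the for-loop with early return over _GROUP_TABLE
def pvGroupNameGo (setting : String) : List (String × String) → String
  | [] => "General Configuration"
  | (prefix_, name) :: rest =>
      if PySem.Str.startswith setting prefix_ then name else pvGroupNameGo setting rest

def pvGroupName (setting : String) : String := pvGroupNameGo setting pvGroupTable

def group_config_rows_py_alt (rows : List (String × String × String)) : List (String × List (String × String × String)) :=
  -- Stage 1: tagged = [(_group_name(s), (_clean_setting(s), v, d)) for s, v, d in rows]
  let tagged := rows.map (fun r => (pvGroupName r.1, (pvCleanSetting r.1, r.2.1, r.2.2)))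
  -- Stage 2: order = list(dict.fromkeys(name for name, _ in tagged))
  let order := PySem.List.dedup (tagged.map (·.1))
  -- Stage 3: {g: [row for name, row in tagged if name == g] for g in order}
  order.map (fun g => (g, (tagged.filter (fun p => p.1 == g)).map (·.2)))

-- ===== PRECONDITION & SPEC =====
def Spec_group_config_rows_py (rows : List (String × String × String)) (out : List (String × List (String × String × String))) : Prop := out = group_config_rows_py_alt rows
instance (rows : List (String × String × String)) (out : List (String × List (String × String × String))) : Decidable (Spec_group_config_rows_py rows out) := by unfold Spec_group_config_rows_py; infer_instance

-- ===== CLAIM =====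
def Claim_equal_group_config_rows_py : Prop := ∀ (rows : List (String × String × String)), Dom_group_config_rows_py rows → Spec_group_config_rows_py rows (group_config_rows_py rows)

-- ===== LEMMAS AND PROOFS =====

-- B's table loop picks the same group name as A's if/elif chain
theorem groupName_eq_chain (s : String) : pvGroupName s = pvGroupChain s := by
  simp only [pvGroupName, pvGroupTable, pvGroupNameGo, pvGroupChain]

-- A's 'ensure the key exists, then append' step IS a single modify with default []
theorem step_eq_modify (d : PySem.Dict String (List (String × String × String))) (k : String)
    (r : String × String × String) :
    (if d.contains k then d else d.insert k []).modify k [] (· ++ [r])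
      = d.modify k [] (· ++ [r]) := by
  by_cases h : d.contains k = true
  · simp [h]
  · simp only [Bool.not_eq_true] at h
    simp [h, PySem.Dict.modify, PySem.Dict.getD_insert_self, PySem.Dict.insert_insert_self,
      PySem.Dict.getD_of_not_contains (h := h)]

-- the items of a grouping fold over key-value pairs, as first-occurrence keys with their filtered values
theorem items_grouping_fold {β : Type} [DecidableEq β] (l : List (String × β)) :
    ((l.foldl (fun (d : PySem.Dict String (List β)) p => d.modify p.1 [] (· ++ [p.2]))
        PySem.Dict.empty).items)
      = (PySem.List.dedup (l.map (·.1))).map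
          (fun g => (g, (l.filter (fun p => p.1 == g)).map (·.2))) := by
  have hnd : ((l.foldl (fun (d : PySem.Dict String (List β)) p => d.modify p.1 [] (· ++ [p.2]))
      PySem.Dict.empty).keys).Nodup := by
    exact PySem.Dict.nodup_keys_foldl_modify_key l (·.1) [] (fun _ p => (· ++ [p.2]))
      PySem.Dict.empty (by simp [PySem.Dict.keys_empty])
  rw [PySem.Dict.items_eq_map_keys _ hnd []]
  rw [PySem.Dict.keys_foldl_modify_key l (·.1) [] (fun _ p => (· ++ [p.2])) PySem.Dict.empty]
  have hkeys : PySem.Set.update (PySem.Dict.empty : PySem.Dict String (List β)).keys (l.map (·.1))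
      = PySem.List.dedup (l.map (·.1)) := by
    simp [PySem.Dict.keys_empty, PySem.Set.update, PySem.List.dedup_eq_ofList,
      PySem.Set.ofList_eq_foldl]
  rw [hkeys]
  apply List.map_congr_left
  intro g _
  rw [PySem.Dict.getD_foldl_modify_append, PySem.Dict.getD_empty]
  simp

-- ===== VERDICT =====
theorem group_config_rows_py_spec : Claim_equal_group_config_rows_py := by
  intro rows _
  unfold Spec_group_config_rows_py group_config_rows_py group_config_rows_py_alt
  have hstep : (fun (d : PySem.Dict String (List (String × String × String))) (row : String × String × String) =>
      (if d.contains (pvGroupChain row.1) then d else d.insert (pvGroupChain row.1) []).modify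
        (pvGroupChain row.1) [] (· ++ [(pvCleanSetting row.1, row.2.1, row.2.2)]))
      = (fun d row =>
          d.modify (pvGroupName row.1, (pvCleanSetting row.1, row.2.1, row.2.2)).1 []
            (· ++ [(pvGroupName row.1, (pvCleanSetting row.1, row.2.1, row.2.2)).2])) := by
    funext d row
    simp only [step_eq_modify, groupName_eq_chain]
  simp only [hstep]
  rw [← items_grouping_fold (rows.map (fun r => (pvGroupName r.1, (pvCleanSetting r.1, r.2.1, r.2.2))))]
  rw [List.foldl_map]
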